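-- pv_equiv track=rewrite | github.com/audreyfabiola/Disk-Scheduling | disk_scheduling.py | CSCAN_optimized
-- ===== SOURCE A (Python) =====
-- def CSCAN_optimized(initial_position, requests):
--     disk_size = 5000
--     head_movements = 0
--     head = initial_position
--
--     # Cylinder positions according to direction
--     left_requests = [0]
--     right_requests = [disk_size - 1]
--
--     # Dividing the requests to either left or right
--     for request in requests:
--         if request < head:
--             left_requests.append(request)
--         else:
--             right_requests.append(request)
--
--     # Sort the requests
--     left_requests.sort()
--     right_requests.sort()
--
--     # Process the right requests
--     for current_track in right_requests:
--         head_movements += abs(current_track - head)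
--         head = current_track
--
--      # Go to the beginning of disk
--     head_movements += (disk_size - 1)
--     head = 0
--
--     # Process the left requests
--     for current_track in left_requests:
--         head_movements += abs(current_track - head)
--         head = current_track
--
--     return head_movements
-- ===== SOURCE B (Python) =====
-- def CSCAN_optimized(initial_position, requests):
--     # Closed form: one pass keeps min/max of each side; the sorted sweeps telescope.
--     DISK_END = 4999
--     lo_min = lo_max = 0
--     hi_min = hi_max = DISK_END
--     for r in requests:
--         if r < initial_position:
--             if r < lo_min:
--                 lo_min = r
--             if r > lo_max:
--                 lo_max = r
--         else:
--             if r < hi_min: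
--                 hi_min = r
--             if r > hi_max:
--                 hi_max = r
--     return (abs(hi_min - initial_position) + (hi_max - hi_min)
--             + DISK_END + abs(lo_min) + (lo_max - lo_min))
-- ===== Notes on version B (the rewrite author's own statement) =====
-- stated objective: faster
-- what changed: Replaces the partition-into-lists + two sorts + two sweep loops by a single pass that tracks min/max of each side and a closed-form telescoped total.
import Mathlib
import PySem

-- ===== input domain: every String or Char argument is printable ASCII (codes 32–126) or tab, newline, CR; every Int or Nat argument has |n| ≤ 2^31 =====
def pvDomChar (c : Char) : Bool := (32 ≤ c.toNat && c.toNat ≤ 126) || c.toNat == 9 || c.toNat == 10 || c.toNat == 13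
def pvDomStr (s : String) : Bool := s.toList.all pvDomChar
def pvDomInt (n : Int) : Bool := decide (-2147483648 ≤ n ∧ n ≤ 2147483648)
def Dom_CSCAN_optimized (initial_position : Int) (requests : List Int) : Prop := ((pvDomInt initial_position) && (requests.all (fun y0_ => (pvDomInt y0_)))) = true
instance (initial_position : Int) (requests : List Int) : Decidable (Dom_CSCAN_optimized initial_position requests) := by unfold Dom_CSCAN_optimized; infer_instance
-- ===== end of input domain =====

-- B replaces A's partition + two sorts + two sweep loops by one min/max pass and a closed form (faster).

-- ===== PORT A =====
def CSCAN_optimized (initial_position : Int) (requests : List Int) : Int :=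
  let disk_size : Int := 5000
  let head := initial_position
  -- dividing the requests to either left (init [0]) or right (init [disk_size-1])
  let parts := requests.foldl
    (fun (lr : List Int × List Int) request =>
      if request < head then (lr.1 ++ [request], lr.2) else (lr.1, lr.2 ++ [request]))
    ([0], [disk_size - 1])
  let left_requests := PySem.List.sorted parts.1 (fun x => x) false
  let right_requests := PySem.List.sorted parts.2 (fun x => x) false
  -- process the right requests
  let s1 := right_requests.foldl
    (fun (mh : Int × Int) current_track => (mh.1 + |current_track - mh.2|, current_track))
    (0, head)
  -- go to the beginning of disk
  let s2 : Int × Int := (s1.1 + (disk_size - 1), 0)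
  -- process the left requests
  let s3 := left_requests.foldl
    (fun (mh : Int × Int) current_track => (mh.1 + |current_track - mh.2|, current_track))
    s2
  s3.1

-- ===== PORT B =====
def CSCAN_optimized_alt (initial_position : Int) (requests : List Int) : Int :=
  let diskEnd : Int := 4999
  -- one pass: (lo_min, lo_max, hi_min, hi_max)
  let s := requests.foldl
    (fun (st : Int × Int × Int × Int) r =>
      if r < initial_position then
        ((if r < st.1 then r else st.1), (if r > st.2.1 then r else st.2.1), st.2.2.1, st.2.2.2)
      else
        (st.1, st.2.1, (if r < st.2.2.1 then r else st.2.2.1), (if r > st.2.2.2 then r else st.2.2.2)))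
    (0, 0, diskEnd, diskEnd)
  |s.2.2.1 - initial_position| + (s.2.2.2 - s.2.2.1) + diskEnd + |s.1| + (s.2.1 - s.1)

-- ===== PRECONDITION & SPEC =====
def Spec_CSCAN_optimized (initial_position : Int) (requests : List Int) (out : Int) : Prop := out = CSCAN_optimized_alt initial_position requests
instance (initial_position : Int) (requests : List Int) (out : Int) : Decidable (Spec_CSCAN_optimized initial_position requests out) := by unfold Spec_CSCAN_optimized; infer_instance

-- ===== CLAIM (what is proved, stated in full; the proofs are below) =====
def Claim_equal_CSCAN_optimized : Prop := ∀ (initial_position : Int) (requests : List Int), Dom_CSCAN_optimized initial_position requests → Spec_CSCAN_optimized initial_position requests (CSCAN_optimized initial_position requests)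

-- ===== LEMMAS AND PROOFS =====

theorem pv_partition (c : Int) (requests l0 r0 : List Int) :
    requests.foldl
      (fun (lr : List Int × List Int) request =>
        if request < c then (lr.1 ++ [request], lr.2) else (lr.1, lr.2 ++ [request]))
      (l0, r0)
    = (l0 ++ requests.filter (fun x => decide (x < c)),
       r0 ++ requests.filter (fun x => !decide (x < c))) := by
  induction requests generalizing l0 r0 with
  | nil => simp
  | cons x t ih =>
    by_cases h : x < c <;> simp [h, ih, List.append_assoc]

theorem pv_bfold (cc : Int) (requests : List Int) (a b c d : Int) :
    requests.foldl
      (fun (st : Int × Int × Int × Int) r =>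
        if r < cc then
          ((if r < st.1 then r else st.1), (if r > st.2.1 then r else st.2.1), st.2.2.1, st.2.2.2)
        else
          (st.1, st.2.1, (if r < st.2.2.1 then r else st.2.2.1), (if r > st.2.2.2 then r else st.2.2.2)))
      (a, b, c, d)
    = ((requests.filter (fun x => decide (x < cc))).foldl min a,
       (requests.filter (fun x => decide (x < cc))).foldl max b,
       (requests.filter (fun x => !decide (x < cc))).foldl min c,
       (requests.filter (fun x => !decide (x < cc))).foldl max d) := by
  have hmin : ∀ u v : Int, (if v < u then v else u) = min u v := by
    intro u v; rw [min_def]; split_ifs <;> omega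
  have hmax : ∀ u v : Int, (if v > u then v else u) = max u v := by
    intro u v; rw [max_def]; split_ifs <;> omega
  have hfun : (fun (st : Int × Int × Int × Int) r =>
        if r < cc then
          ((if r < st.1 then r else st.1), (if r > st.2.1 then r else st.2.1), st.2.2.1, st.2.2.2)
        else
          (st.1, st.2.1, (if r < st.2.2.1 then r else st.2.2.1), (if r > st.2.2.2 then r else st.2.2.2)))
      = (fun (st : Int × Int × Int × Int) r =>
        if r < cc then (min st.1 r, max st.2.1 r, st.2.2.1, st.2.2.2)
        else (st.1, st.2.1, min st.2.2.1 r, max st.2.2.2 r)) := by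
    funext st r; simp only [hmin, hmax]
  rw [hfun]
  induction requests generalizing a b c d with
  | nil => simp
  | cons x t ih =>
    by_cases h : x < cc <;> simp [h, ih]

theorem pv_foldl_min_eq (l : List Int) (m : Int) (h1 : ∀ y ∈ l, m ≤ y) :
    ∀ a, (m ∈ l ∨ m = a) → m ≤ a → l.foldl min a = m := by
  induction l with
  | nil =>
    intro a h2 _
    rcases h2 with h2 | h2
    · simp at h2
    · simpa using h2.symm
  | cons x t ih =>
    intro a h2 h3
    have hmx : m ≤ x := h1 x (by simp)
    have h1' : ∀ y ∈ t, m ≤ y := fun y hy => h1 y (by simp [hy])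
    simp only [List.foldl_cons]
    rcases h2 with h2 | h2
    · rcases List.mem_cons.1 h2 with rfl | hmem
      · exact ih h1' _ (Or.inr (min_eq_right h3).symm) (le_min h3 hmx)
      · exact ih h1' _ (Or.inl hmem) (le_min h3 hmx)
    · subst h2; exact ih h1' _ (Or.inr (min_eq_left hmx).symm) (le_min h3 hmx)

theorem pv_foldl_max_eq (l : List Int) (m : Int) (h1 : ∀ y ∈ l, y ≤ m) :
    ∀ a, (m ∈ l ∨ m = a) → a ≤ m → l.foldl max a = m := by
  induction l with
  | nil =>
    intro a h2 _
    rcases h2 with h2 | h2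
    · simp at h2
    · simpa using h2.symm
  | cons x t ih =>
    intro a h2 h3
    have hmx : x ≤ m := h1 x (by simp)
    have h1' : ∀ y ∈ t, y ≤ m := fun y hy => h1 y (by simp [hy])
    simp only [List.foldl_cons]
    rcases h2 with h2 | h2
    · rcases List.mem_cons.1 h2 with rfl | hmem
      · exact ih h1' _ (Or.inr (max_eq_right h3).symm) (max_le h3 hmx)
      · exact ih h1' _ (Or.inl hmem) (max_le h3 hmx)
    · subst h2; exact ih h1' _ (Or.inr (max_eq_left hmx).symm) (max_le h3 hmx)

theorem pv_le_foldl_max (l : List Int) (a : Int) : a ≤ l.foldl max a := by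
  induction l generalizing a with
  | nil => simp
  | cons x t ih => exact le_trans (le_max_left a x) (ih _)

theorem pv_foldl_max_isMax (l : List Int) (a : Int) : ∀ y ∈ l, y ≤ l.foldl max a := by
  induction l generalizing a with
  | nil => simp
  | cons x t ih =>
    intro y hy
    rcases List.mem_cons.1 hy with rfl | hy
    · exact le_trans (le_max_right a y) (pv_le_foldl_max t _)
    · exact ih _ y hy

theorem pv_foldl_max_mem (l : List Int) (a : Int) : l.foldl max a ∈ l ∨ l.foldl max a = a := by
  induction l generalizing a with
  | nil => simp
  | cons x t ih =>
    simp only [List.foldl_cons]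
    rcases ih (max a x) with h | h
    · exact Or.inl (List.mem_cons_of_mem _ h)
    · rcases max_choice a x with h' | h'
      · exact Or.inr (h.trans h')
      · exact Or.inl (by rw [h, h']; simp)

-- a sweep over a nondecreasing list telescopes: cost |m - h| + (max - m), final head = running max
theorem pv_sweep (t : List Int) (m acc h : Int) (hp : (m :: t).Pairwise (· ≤ ·)) :
    (m :: t).foldl
      (fun (mh : Int × Int) current_track => (mh.1 + |current_track - mh.2|, current_track))
      (acc, h)
    = (acc + |m - h| + (t.foldl max m - m), t.foldl max m) := by
  induction t generalizing m acc h with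
  | nil => simp
  | cons x t ih =>
    have hmx : m ≤ x := (List.pairwise_cons.1 hp).1 x (by simp)
    have hp' : (x :: t).Pairwise (· ≤ ·) := (List.pairwise_cons.1 hp).2
    have hrec := ih x (acc + |m - h|) m hp'
    simp only [List.foldl_cons] at hrec ⊢
    rw [hrec]
    have hax : |x - m| = x - m := abs_of_nonneg (by omega)
    have hmax : max m x = x := max_eq_right hmx
    rw [hmax, hax]
    refine Prod.ext ?_ rfl
    simp only []
    ring

theorem CSCAN_optimized_eq (initial_position : Int) (requests : List Int) :
    CSCAN_optimized initial_position requests = CSCAN_optimized_alt initial_position requests := by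
  unfold CSCAN_optimized CSCAN_optimized_alt
  simp only [show (5000 : Int) - 1 = 4999 from by norm_num]
  rw [pv_partition initial_position requests [0] [4999],
      pv_bfold initial_position requests 0 0 4999 4999]
  set fl := requests.filter (fun x => decide (x < initial_position)) with hfl
  set fr := requests.filter (fun x => !decide (x < initial_position)) with hfr
  set L : List Int := (0 : Int) :: fl with hL
  set R : List Int := (4999 : Int) :: fr with hR
  have hLL : [(0 : Int)] ++ fl = L := rfl
  have hRR : [(4999 : Int)] ++ fr = R := rfl
  rw [hLL, hRR]
  obtain ⟨mR, tR, hsR⟩ : ∃ m t, PySem.List.sorted R (fun x => x) false = m :: t := by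
    rcases hh : PySem.List.sorted R (fun x => x) false with _ | ⟨m, t⟩
    · exact absurd ((PySem.List.sorted_eq_nil_iff _ _ _).1 hh) (by simp [hR])
    · exact ⟨m, t, rfl⟩
  obtain ⟨mL, tL, hsL⟩ : ∃ m t, PySem.List.sorted L (fun x => x) false = m :: t := by
    rcases hh : PySem.List.sorted L (fun x => x) false with _ | ⟨m, t⟩
    · exact absurd ((PySem.List.sorted_eq_nil_iff _ _ _).1 hh) (by simp [hL])
    · exact ⟨m, t, rfl⟩
  have hpR : (mR :: tR).Pairwise (· ≤ ·) := by
    have := PySem.List.sorted_pairwise R (fun x : Int => x)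
    rwa [hsR] at this
  have hpL : (mL :: tL).Pairwise (· ≤ ·) := by
    have := PySem.List.sorted_pairwise L (fun x : Int => x)
    rwa [hsL] at this
  have hpermR : (mR :: tR).Perm R := hsR ▸ PySem.List.sorted_perm ..
  have hpermL : (mL :: tL).Perm L := hsL ▸ PySem.List.sorted_perm ..
  -- heads of the sorted lists are the minima
  have hminR : ∀ y ∈ R, mR ≤ y := fun y hy =>
    PySem.List.key_head_sorted_le R (fun x : Int => x) hsR y hy
  have hminL : ∀ y ∈ L, mL ≤ y := fun y hy =>
    PySem.List.key_head_sorted_le L (fun x : Int => x) hsL y hy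
  have hmRmem : mR ∈ R := hpermR.mem_iff.1 (by simp)
  have hmLmem : mL ∈ L := hpermL.mem_iff.1 (by simp)
  have hminR' : fr.foldl min 4999 = mR := by
    refine pv_foldl_min_eq _ _ (fun y hy => hminR y (by simp [hR, hy])) _ ?_ (hminR 4999 (by simp [hR]))
    rcases List.mem_cons.1 hmRmem with h | h
    · exact Or.inr h
    · exact Or.inl h
  have hminL' : fl.foldl min 0 = mL := by
    refine pv_foldl_min_eq _ _ (fun y hy => hminL y (by simp [hL, hy])) _ ?_ (hminL 0 (by simp [hL]))
    rcases List.mem_cons.1 hmLmem with h | h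
    · exact Or.inr h
    · exact Or.inl h
  -- running maxima of the sorted tails are B's maxima
  have hmaxRub : ∀ y ∈ R, y ≤ fr.foldl max 4999 := by
    intro y hy
    rcases List.mem_cons.1 hy with rfl | hy
    · exact pv_le_foldl_max fr 4999
    · exact pv_foldl_max_isMax fr 4999 y hy
  have hmaxLub : ∀ y ∈ L, y ≤ fl.foldl max 0 := by
    intro y hy
    rcases List.mem_cons.1 hy with rfl | hy
    · exact pv_le_foldl_max fl 0
    · exact pv_foldl_max_isMax fl 0 y hy
  have hmaxRmem : fr.foldl max 4999 ∈ R := by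
    rcases pv_foldl_max_mem fr 4999 with h | h
    · exact List.mem_cons_of_mem _ h
    · rw [h]; simp [hR]
  have hmaxLmem : fl.foldl max 0 ∈ L := by
    rcases pv_foldl_max_mem fl 0 with h | h
    · exact List.mem_cons_of_mem _ h
    · rw [h]; simp [hL]
  have hmaxR : tR.foldl max mR = fr.foldl max 4999 := by
    refine pv_foldl_max_eq _ _ (fun y hy => hmaxRub y (hpermR.subset (List.mem_cons_of_mem _ hy))) _ ?_
      (hmaxRub mR hmRmem)
    rcases List.mem_cons.1 (hpermR.mem_iff.2 hmaxRmem) with h | h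
    · exact Or.inr h
    · exact Or.inl h
  have hmaxL : tL.foldl max mL = fl.foldl max 0 := by
    refine pv_foldl_max_eq _ _ (fun y hy => hmaxLub y (hpermL.subset (List.mem_cons_of_mem _ hy))) _ ?_
      (hmaxLub mL hmLmem)
    rcases List.mem_cons.1 (hpermL.mem_iff.2 hmaxLmem) with h | h
    · exact Or.inr h
    · exact Or.inl h
  rw [hsR, hsL, pv_sweep tR mR 0 initial_position hpR, pv_sweep tL mL _ 0 hpL]
  simp only [hminR', hminL', hmaxR, hmaxL]
  ring_nf

-- ===== VERDICT (by name: the statement is the Claim_ definition above) =====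
theorem CSCAN_optimized_spec : Claim_equal_CSCAN_optimized := by
  intro initial_position requests _
  unfold Spec_CSCAN_optimized
  exact CSCAN_optimized_eq initial_position requests
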